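-- pv_equiv track=rewrite | github.com/sbaldu/applications | vertexing/metrics.py | create_pairs_from_labels
-- ===== SOURCE A (Python) =====
-- def create_pairs_from_labels(labels, energy, all_pairs=False):
--     pairs, pair_en, explored_labels = [], [], []
--
--     for i in range(len(labels)):
--         l = labels[i]
--
--         if i != len(labels):
--             for j in range(i+1, len(labels)):
--                 if l == labels[j] or all_pairs:
--                     pairs.append((i, j))
--                     pair_en.append(energy[i] + energy[j])
--                     if l not in explored_labels:
--                         explored_labels.append(l)
--
-- #         if l not in explored_labels:
-- #             pairs.append((i, i))
-- #             pair_en.append(energy[i])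
--
--     return pairs, pair_en
-- ===== SOURCE B (Python) =====
-- def create_pairs_from_labels(labels, energy, all_pairs=False):
--     pairs, pair_en = [], []
--     if all_pairs:
--         n = len(labels)
--         for i in range(n):
--             for j in range(i + 1, n):
--                 pairs.append((i, j))
--                 pair_en.append(energy[i] + energy[j])
--     else:
--         groups = {}
--         for idx, l in enumerate(labels):
--             groups.setdefault(l, []).append(idx)
--         for i, l in enumerate(labels):
--             for j in groups[l]:
--                 if j > i:
--                     pairs.append((i, j))
--                     pair_en.append(energy[i] + energy[j])
--     return pairs, pair_en
-- ===== Notes on version B (the rewrite author's own statement) =====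
-- stated objective: faster
-- what changed: Instead of scanning all later indices for each i, B builds one dict grouping indices by label and, for each i, emits only the later indices of i's own group (the all_pairs case keeps the plain double loop without the label test); intended as asymptotically faster when labels are mostly distinct (a timing run measured B 6.4x at n=256 up to 707x at n=16384 on the inputs where both finish; on duplicate-heavy inputs the output itself is quadratic and both programs are bounded by output size, so that run could not confirm the label at the largest sizes).
import Mathlib
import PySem

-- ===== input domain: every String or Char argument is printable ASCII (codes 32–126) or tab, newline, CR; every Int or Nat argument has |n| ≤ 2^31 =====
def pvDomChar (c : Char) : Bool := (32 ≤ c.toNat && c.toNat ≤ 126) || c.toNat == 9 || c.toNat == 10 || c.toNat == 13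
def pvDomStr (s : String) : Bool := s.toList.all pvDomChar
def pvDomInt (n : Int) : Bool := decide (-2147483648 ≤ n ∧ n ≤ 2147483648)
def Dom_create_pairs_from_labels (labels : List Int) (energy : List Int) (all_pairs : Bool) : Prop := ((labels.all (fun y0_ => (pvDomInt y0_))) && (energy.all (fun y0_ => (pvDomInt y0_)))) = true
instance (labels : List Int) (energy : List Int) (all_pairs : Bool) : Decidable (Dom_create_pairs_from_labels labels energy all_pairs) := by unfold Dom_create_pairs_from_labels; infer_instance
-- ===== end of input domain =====

-- B replaces A's quadratic scan of all later indices per i by one dict grouping the indices of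
-- each label, emitting only the later indices of i's own group (the all_pairs case keeps the
-- plain double loop without the label test); intended as faster when labels are mostly distinct
-- (work proportional to n + number of emitted pairs); same return value, proved on Pre_ below.
-- Pre_ is needed for faithfulness to the Python (A raises IndexError outside it); the ports are
-- total via pyGetD, so the equality proof itself does not consume the Pre_ hypothesis.

-- ===== PORT A =====
-- Literal port of A's nested index loops; the Python local `l = labels[i]` is inlined at its
-- use sites; explored_labels is the third state component (it never reaches the result).
-- energy[i]/energy[j] are pyGetD: in range exactly on Pre_ (out of range, Python raises).
def create_pairs_from_labels (labels : List Int) (energy : List Int) (all_pairs : Bool) : (List (Int × Int)) × List Int :=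
  let res :=
    (PySem.List.pyRange 0 (labels.length : Int)).foldl
      (fun (st : List (Int × Int) × List Int × List Int) i =>
        if i ≠ (labels.length : Int) then
          (PySem.List.pyRange (i + 1) (labels.length : Int)).foldl
            (fun (st2 : List (Int × Int) × List Int × List Int) j =>
              if PySem.List.pyGetD labels i 0 = PySem.List.pyGetD labels j 0 ∨ all_pairs = true then
                (st2.1 ++ [(i, j)],
                 st2.2.1 ++ [PySem.List.pyGetD energy i 0 + PySem.List.pyGetD energy j 0],
                 if PySem.List.pyGetD labels i 0 ∈ st2.2.2 then st2.2.2
                 else st2.2.2 ++ [PySem.List.pyGetD labels i 0])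
              else st2)
            st
        else st)
      ([], [], [])
  (res.1, res.2.1)

-- ===== PORT B =====
-- groups = {};  for idx, l in enumerate(labels): groups.setdefault(l, []).append(idx)
def cpfl_groups (labels : List Int) : PySem.Dict Int (List Int) :=
  (PySem.List.enumerate labels).foldl
    (fun d p => d.modify p.2 [] (fun xs => xs ++ [p.1])) PySem.Dict.empty

def create_pairs_from_labels_alt (labels : List Int) (energy : List Int) (all_pairs : Bool) : (List (Int × Int)) × List Int :=
  if all_pairs then
    (PySem.List.pyRange 0 (labels.length : Int)).foldl
      (fun (st : List (Int × Int) × List Int) i =>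
        (PySem.List.pyRange (i + 1) (labels.length : Int)).foldl
          (fun (st2 : List (Int × Int) × List Int) j =>
            (st2.1 ++ [(i, j)],
             st2.2 ++ [PySem.List.pyGetD energy i 0 + PySem.List.pyGetD energy j 0]))
          st)
      ([], [])
  else
    let groups := cpfl_groups labels
    (PySem.List.enumerate labels).foldl
      (fun (st : List (Int × Int) × List Int) p =>
        (groups.getD p.2 []).foldl
          (fun (st2 : List (Int × Int) × List Int) j =>
            if p.1 < j then
              (st2.1 ++ [(p.1, j)],
               st2.2 ++ [PySem.List.pyGetD energy p.1 0 + PySem.List.pyGetD energy j 0])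
            else st2)
          st)
      ([], [])

-- ===== PRECONDITION & SPEC =====
-- Pre_ excludes exactly the inputs where Python A raises IndexError: some emitted pair (i, j)
-- would read energy[i] or energy[j] (i < j) past the end of energy.
def Pre_create_pairs_from_labels (labels : List Int) (energy : List Int) (all_pairs : Bool) : Prop :=
  ∀ j : Nat, j < labels.length →
    (all_pairs = true ∨ ∃ i : Nat, i < j ∧ labels.getD i 0 = labels.getD j 0) →
    j < energy.length
instance (labels : List Int) (energy : List Int) (all_pairs : Bool) : Decidable (Pre_create_pairs_from_labels labels energy all_pairs) := by unfold Pre_create_pairs_from_labels; infer_instance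
def pvWitness_create_pairs_from_labels : List Int × List Int × Bool := ([1, 1, 2], [5, 7, 9], false)

def Spec_create_pairs_from_labels (labels : List Int) (energy : List Int) (all_pairs : Bool) (out : (List (Int × Int)) × List Int) : Prop := out = create_pairs_from_labels_alt labels energy all_pairs
instance (labels : List Int) (energy : List Int) (all_pairs : Bool) (out : (List (Int × Int)) × List Int) : Decidable (Spec_create_pairs_from_labels labels energy all_pairs out) := by unfold Spec_create_pairs_from_labels; infer_instance

-- ===== CLAIM (what is proved, stated in full; the proofs are below) =====
def Claim_equal_create_pairs_from_labels : Prop := ∀ (labels : List Int) (energy : List Int) (all_pairs : Bool), Dom_create_pairs_from_labels labels energy all_pairs → Pre_create_pairs_from_labels labels energy all_pairs → Spec_create_pairs_from_labels labels energy all_pairs (create_pairs_from_labels labels energy all_pairs)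

-- ===== LEMMAS AND PROOFS =====

theorem foldl_pair_append {α β γ : Type} (f : α → β) (g : α → γ) (js : List α) :
    ∀ (s : List β × List γ),
    js.foldl (fun st j => (st.1 ++ [f j], st.2 ++ [g j])) s
      = (s.1 ++ js.map f, s.2 ++ js.map g) := by
  induction js with
  | nil => simp
  | cons j js ih => intro s; simp [ih]

theorem foldl_pair_append_if {α β γ : Type} (p : α → Prop) [DecidablePred p]
    (f : α → β) (g : α → γ) (js : List α) :
    ∀ (s : List β × List γ),
    js.foldl (fun st j => if p j then (st.1 ++ [f j], st.2 ++ [g j]) else st) s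
      = (s.1 ++ (js.filter (fun j => decide (p j))).map f,
         s.2 ++ (js.filter (fun j => decide (p j))).map g) := by
  induction js with
  | nil => simp
  | cons j js ih =>
    intro s
    by_cases h : p j
    · simp [h, ih]
    · simp [h, ih]

theorem foldl_triple_append_if {α β γ δ : Type} (p : α → Prop) [DecidablePred p]
    (f : α → β) (g : α → γ) (u : δ → δ) (js : List α) :
    ∀ (s : List β × List γ × δ),
    js.foldl (fun st j => if p j then (st.1 ++ [f j], st.2.1 ++ [g j], u st.2.2) else st) s
      = (s.1 ++ (js.filter (fun j => decide (p j))).map f,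
         s.2.1 ++ (js.filter (fun j => decide (p j))).map g,
         u^[(js.filter (fun j => decide (p j))).length] s.2.2) := by
  induction js with
  | nil => simp
  | cons j js ih =>
    intro s
    by_cases h : p j
    · simp [h, ih, Function.iterate_succ_apply]
    · simp [h, ih]

theorem foldl_pair_flat {α β γ : Type} (F : α → List β) (G : α → List γ) (ps : List α) :
    ∀ (s : List β × List γ),
    ps.foldl (fun st a => (st.1 ++ F a, st.2 ++ G a)) s
      = (s.1 ++ ps.flatMap F, s.2 ++ ps.flatMap G) := by
  induction ps with
  | nil => simp
  | cons a ps ih => intro s; simp [ih]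

theorem flatMap_congr_mem {α β : Type} (l : List α) {f g : α → List β}
    (h : ∀ a ∈ l, f a = g a) : l.flatMap f = l.flatMap g := by
  induction l with
  | nil => simp
  | cons a l ih =>
    simp only [List.flatMap_cons]
    rw [h a (by simp), ih (fun a ha => h a (by simp [ha]))]

-- the j-list A emits for a given i
def aChunk (labels : List Int) (all_pairs : Bool) (i : Int) : List Int :=
  (PySem.List.pyRange (i + 1) (labels.length : Int)).filter
    (fun j => decide (PySem.List.pyGetD labels i 0 = PySem.List.pyGetD labels j 0 ∨ all_pairs = true))

theorem A_outer (labels energy : List Int) (all_pairs : Bool) (is : List Int)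
    (his : ∀ i ∈ is, i < (labels.length : Int)) :
    ∀ (s : List (Int × Int) × List Int × List Int),
    ((is.foldl
      (fun (st : List (Int × Int) × List Int × List Int) i =>
        if i ≠ (labels.length : Int) then
          (PySem.List.pyRange (i + 1) (labels.length : Int)).foldl
            (fun (st2 : List (Int × Int) × List Int × List Int) j =>
              if PySem.List.pyGetD labels i 0 = PySem.List.pyGetD labels j 0 ∨ all_pairs = true then
                (st2.1 ++ [(i, j)],
                 st2.2.1 ++ [PySem.List.pyGetD energy i 0 + PySem.List.pyGetD energy j 0],
                 if PySem.List.pyGetD labels i 0 ∈ st2.2.2 then st2.2.2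
                 else st2.2.2 ++ [PySem.List.pyGetD labels i 0])
              else st2)
            st
        else st)
      s).1,
     (is.foldl
      (fun (st : List (Int × Int) × List Int × List Int) i =>
        if i ≠ (labels.length : Int) then
          (PySem.List.pyRange (i + 1) (labels.length : Int)).foldl
            (fun (st2 : List (Int × Int) × List Int × List Int) j =>
              if PySem.List.pyGetD labels i 0 = PySem.List.pyGetD labels j 0 ∨ all_pairs = true then
                (st2.1 ++ [(i, j)],
                 st2.2.1 ++ [PySem.List.pyGetD energy i 0 + PySem.List.pyGetD energy j 0],
                 if PySem.List.pyGetD labels i 0 ∈ st2.2.2 then st2.2.2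
                 else st2.2.2 ++ [PySem.List.pyGetD labels i 0])
              else st2)
            st
        else st)
      s).2.1)
      = (s.1 ++ is.flatMap (fun i => (aChunk labels all_pairs i).map (fun j => (i, j))),
         s.2.1 ++ is.flatMap (fun i => (aChunk labels all_pairs i).map
           (fun j => PySem.List.pyGetD energy i 0 + PySem.List.pyGetD energy j 0))) := by
  induction is with
  | nil => simp
  | cons i is ih =>
    intro s
    have hi : i ≠ (labels.length : Int) := ne_of_lt (his i (List.mem_cons_self))
    have hstep := foldl_triple_append_if
      (fun j => PySem.List.pyGetD labels i 0 = PySem.List.pyGetD labels j 0 ∨ all_pairs = true)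
      (fun j => ((i : Int), j))
      (fun j => PySem.List.pyGetD energy i 0 + PySem.List.pyGetD energy j 0)
      (fun e => if PySem.List.pyGetD labels i 0 ∈ e then e else e ++ [PySem.List.pyGetD labels i 0])
      (PySem.List.pyRange (i + 1) (labels.length : Int)) s
    beta_reduce at hstep
    rw [List.foldl_cons]
    rw [if_pos hi, hstep, ih (fun a ha => his a (List.mem_cons_of_mem i ha))]
    simp [aChunk, List.append_assoc]

theorem A_char (labels energy : List Int) (all_pairs : Bool) :
    create_pairs_from_labels labels energy all_pairs
      = ((PySem.List.pyRange 0 (labels.length : Int)).flatMap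
           (fun i => (aChunk labels all_pairs i).map (fun j => (i, j))),
         (PySem.List.pyRange 0 (labels.length : Int)).flatMap
           (fun i => (aChunk labels all_pairs i).map
             (fun j => PySem.List.pyGetD energy i 0 + PySem.List.pyGetD energy j 0))) := by
  have h := A_outer labels energy all_pairs (PySem.List.pyRange 0 (labels.length : Int))
    (fun i hi => (PySem.List.mem_pyRange_one.mp hi).2) ([], [], [])
  simp only [List.nil_append] at h
  unfold create_pairs_from_labels
  exact h

theorem groups_foldl (ps : List (Int × Int)) :
    ∀ (d : PySem.Dict Int (List Int)) (l : Int),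
    (ps.foldl (fun d p => d.modify p.2 [] (fun xs => xs ++ [p.1])) d).getD l []
      = d.getD l [] ++ ((ps.filter (fun p => p.2 == l)).map (fun p => p.1)) := by
  induction ps with
  | nil => simp
  | cons p ps ih =>
    intro d l
    rw [List.foldl_cons, ih]
    by_cases h : l = p.2
    · simp [h]
    · simp [h, PySem.Dict.getD_modify, Ne.symm h]

theorem groups_getD (labels : List Int) (l : Int) :
    (cpfl_groups labels).getD l []
      = (PySem.List.pyRange 0 (labels.length : Int)).filter
          (fun j => PySem.List.pyGetD labels j 0 == l) := by
  unfold cpfl_groups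
  rw [groups_foldl, PySem.Dict.getD_empty, PySem.List.enumerate_eq_map_pyRange labels 0,
    List.filter_map, List.map_map]
  simp [Function.comp_def, PySem.List.len_eq]

theorem B_char_false (labels energy : List Int) :
    create_pairs_from_labels_alt labels energy false
      = ((PySem.List.enumerate labels).flatMap
           (fun p => (((cpfl_groups labels).getD p.2 []).filter (fun j => decide (p.1 < j))).map
             (fun j => (p.1, j))),
         (PySem.List.enumerate labels).flatMap
           (fun p => (((cpfl_groups labels).getD p.2 []).filter (fun j => decide (p.1 < j))).map
             (fun j => PySem.List.pyGetD energy p.1 0 + PySem.List.pyGetD energy j 0))) := by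
  unfold create_pairs_from_labels_alt
  rw [if_neg (by simp)]
  simp only [foldl_pair_append_if, foldl_pair_flat, List.nil_append]

theorem B_char_true (labels energy : List Int) :
    create_pairs_from_labels_alt labels energy true
      = ((PySem.List.pyRange 0 (labels.length : Int)).flatMap
           (fun i => (PySem.List.pyRange (i + 1) (labels.length : Int)).map (fun j => (i, j))),
         (PySem.List.pyRange 0 (labels.length : Int)).flatMap
           (fun i => (PySem.List.pyRange (i + 1) (labels.length : Int)).map
             (fun j => PySem.List.pyGetD energy i 0 + PySem.List.pyGetD energy j 0))) := by
  unfold create_pairs_from_labels_alt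
  rw [if_pos rfl]
  simp only [foldl_pair_append, foldl_pair_flat, List.nil_append]

theorem chunk_eq (labels : List Int) (i : Int) (h0 : 0 ≤ i) (hn : i < (labels.length : Int)) :
    ((PySem.List.pyRange 0 (labels.length : Int)).filter
        (fun j => PySem.List.pyGetD labels j 0 == PySem.List.pyGetD labels i 0)).filter
      (fun j => decide (i < j))
      = aChunk labels false i := by
  rw [List.filter_filter]
  rw [PySem.List.pyRange_one_append 0 (i + 1) (labels.length : Int) (by omega) (by omega),
    List.filter_append]
  have h1 : (PySem.List.pyRange 0 (i + 1)).filter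
      (fun j => decide (i < j) && (PySem.List.pyGetD labels j 0 == PySem.List.pyGetD labels i 0)) = [] := by
    apply List.filter_eq_nil_iff.mpr
    intro j hj
    have hj2 : j < i + 1 := (PySem.List.mem_pyRange_one.mp hj).2
    have hij : ¬ i < j := by omega
    simp [hij]
  rw [h1, List.nil_append]
  unfold aChunk
  apply List.filter_congr
  intro j hj
  have hij : i < j := (PySem.List.mem_pyRange_one.mp hj).1
  by_cases h : PySem.List.pyGetD labels i 0 = PySem.List.pyGetD labels j 0
  · simp [h, hij]
  · simp [hij, h, Ne.symm h]

-- ===== VERDICT (by name: the statement is the Claim_ definition above) =====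
theorem create_pairs_from_labels_spec : Claim_equal_create_pairs_from_labels := by
  unfold Claim_equal_create_pairs_from_labels
  intro labels energy all_pairs _ _
  unfold Spec_create_pairs_from_labels
  cases all_pairs with
  | false =>
    rw [A_char, B_char_false, PySem.List.enumerate_eq_map_pyRange labels 0]
    simp only [List.flatMap_map, PySem.List.len_eq]
    refine congrArg₂ Prod.mk ?_ ?_ <;>
    · apply flatMap_congr_mem
      intro i hi
      obtain ⟨hi0, hin⟩ := PySem.List.mem_pyRange_one.mp hi
      rw [groups_getD]
      rw [chunk_eq labels i hi0 hin]
  | true =>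
    rw [A_char, B_char_true]
    have hch : ∀ i, aChunk labels true i = PySem.List.pyRange (i + 1) (labels.length : Int) := by
      intro i
      unfold aChunk
      apply List.filter_eq_self.mpr
      intro a _
      simp
    simp only [hch]
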